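-- pv_equiv track=rewrite | github.com/nealcox/Advent_2019 | 16b.py | positions_for_base
-- ===== SOURCE A (Python) =====
-- def positions_for_base(base_pos,line,base_len,length):
--     first = (line+1) * base_pos -1
--     begin_clump = first
--     positions = []
--     while begin_clump < length +base_len:
--         for i in range(line+1):
--             if begin_clump + i < length:
--                 positions.append(begin_clump+i)
--         begin_clump += (line+1)*base_len
-- #    if positions:
-- #        while positions[-1] >= length:
-- #            positions = positions[:-1]
-- #        if positions[0] < 0:
-- #            return positions[1:]
-- #    else:
--     if base_pos == 0:
--         return positions[1:]
--     return positions
-- ===== SOURCE B (Python) =====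
-- def positions_for_base(base_pos, line, base_len, length):
--     # Column-major generation: for each offset j inside a pattern window, the
--     # indices carrying it form one arithmetic progression with the pattern
--     # period; collect the w strided ranges and sort them into ascending order,
--     # instead of A's row-major clump walk with a per-element bound test.
--     w = line + 1
--     if w <= 0 or base_len <= 0:
--         return []
--     period = w * base_len
--     first = w * base_pos - 1
--     if length <= first:
--         return []
--     positions = sorted(x for j in range(w) for x in range(first + j, length, period))
--     return positions[1:] if base_pos == 0 else positions
-- ===== Notes on version B (the rewrite author's own statement) =====
-- stated objective: alternative
-- what changed: Replaces A's row-major clump-jumping while-loop (outer loop over clump starts, inner loop appending each clump element under a bound test) with a column-major scheme: one strided range per in-window offset j (the arithmetic progression first+j, first+j+period, ... below length) collected and sorted into ascending order; degenerate non-positive width/pattern-length inputs and an empty scan window return [] directly instead of looping.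
import Mathlib
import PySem

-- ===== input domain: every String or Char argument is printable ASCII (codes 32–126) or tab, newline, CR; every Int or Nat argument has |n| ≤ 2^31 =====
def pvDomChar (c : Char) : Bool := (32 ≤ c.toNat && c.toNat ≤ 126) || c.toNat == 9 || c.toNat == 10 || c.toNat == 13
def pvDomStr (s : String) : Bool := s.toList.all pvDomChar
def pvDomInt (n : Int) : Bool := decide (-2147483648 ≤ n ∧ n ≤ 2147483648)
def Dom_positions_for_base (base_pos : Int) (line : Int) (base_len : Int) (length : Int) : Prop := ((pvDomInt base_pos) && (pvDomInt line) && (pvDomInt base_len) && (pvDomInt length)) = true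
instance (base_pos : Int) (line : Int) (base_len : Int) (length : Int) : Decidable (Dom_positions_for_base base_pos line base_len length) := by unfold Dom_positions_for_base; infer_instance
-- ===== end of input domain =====

-- B replaces A's row-major clump-jumping while-loop by column-major generation: one strided
-- range per in-window offset, collected and sorted into ascending order; same return values.

-- ===== PORT A =====
-- A's while-loop as fuel recursion: the fuel (length+base_len-first).toNat + 1 suffices whenever
-- the Python loop terminates (each pass adds (line+1)*base_len, which is ≥ 1 on Pre_, or the loop
-- is never entered); where Python loops forever (outside Pre_) nothing is claimed.
def pfbLoopA (line base_len length : Int) : Nat → Int → List Int → List Int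
  | 0, _, acc => acc
  | fuel+1, begin_clump, acc =>
    if begin_clump < length + base_len then
      pfbLoopA line base_len length fuel (begin_clump + (line+1)*base_len)
        ((PySem.List.pyRange 0 (line+1) 1).foldl
          (fun a i => if begin_clump + i < length then a ++ [begin_clump + i] else a) acc)
    else acc

def positions_for_base (base_pos : Int) (line : Int) (base_len : Int) (length : Int) : List Int :=
  let first := (line+1) * base_pos - 1
  let positions := pfbLoopA line base_len length ((length + base_len - first).toNat + 1) first []
  if base_pos = 0 then PySem.List.slice positions (some 1) none else positions

-- ===== PORT B =====
def positions_for_base_alt (base_pos : Int) (line : Int) (base_len : Int) (length : Int) : List Int :=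
  let w := line + 1
  if w ≤ 0 ∨ base_len ≤ 0 then []
  else
    let period := w * base_len
    let first := w * base_pos - 1
    if length ≤ first then []
    else
      let positions := PySem.List.sorted
        ((PySem.List.pyRange 0 w 1).flatMap (fun j => PySem.List.pyRange (first + j) length period))
        (fun x => x)
      if base_pos = 0 then PySem.List.slice positions (some 1) none else positions

-- ===== PRECONDITION & SPEC =====
-- Pre_ excludes exactly the inputs on which Python A never returns: a non-positive step
-- (line+1)*base_len with the while-loop entered makes A loop forever; A returns on every other input.
def Pre_positions_for_base (base_pos : Int) (line : Int) (base_len : Int) (length : Int) : Prop :=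
  1 ≤ (line+1)*base_len ∨ length + base_len ≤ (line+1)*base_pos - 1
instance (base_pos : Int) (line : Int) (base_len : Int) (length : Int) : Decidable (Pre_positions_for_base base_pos line base_len length) := by unfold Pre_positions_for_base; infer_instance
def pvWitness_positions_for_base : Int × Int × Int × Int := (1, 2, 4, 20)

def Spec_positions_for_base (base_pos : Int) (line : Int) (base_len : Int) (length : Int) (out : List Int) : Prop := out = positions_for_base_alt base_pos line base_len length
instance (base_pos : Int) (line : Int) (base_len : Int) (length : Int) (out : List Int) : Decidable (Spec_positions_for_base base_pos line base_len length out) := by unfold Spec_positions_for_base; infer_instance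

-- ===== CLAIM (what is proved, stated in full; the proofs are below) =====
def Claim_equal_positions_for_base : Prop := ∀ (base_pos : Int) (line : Int) (base_len : Int) (length : Int), Dom_positions_for_base base_pos line base_len length → Pre_positions_for_base base_pos line base_len length → Spec_positions_for_base base_pos line base_len length (positions_for_base base_pos line base_len length)

-- ===== LEMMAS AND PROOFS =====

-- reference shape A is reduced to: the successive clipped clumps
def pfbClumps (w p length : Int) : Nat → Int → List Int
  | 0, _ => []
  | n+1, c => PySem.List.pyRange c (min (c+w) length) 1 ++ pfbClumps w p length n (c+p)

-- number of loop iterations A performs from start c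
def pfbIters (p bound c : Int) : Nat := (-(PySem.Int.floordiv (c - bound) p)).toNat

theorem pfbIters_zero {p bound c : Int} (hp : 1 ≤ p) (h : bound ≤ c) :
    pfbIters p bound c = 0 := by
  unfold pfbIters
  rw [PySem.Int.floordiv_eq_ediv_of_pos (by omega)]
  have : 0 ≤ (c - bound) / p := Int.ediv_nonneg (by omega) (by omega)
  omega

theorem pfbIters_succ {p bound c : Int} (hp : 1 ≤ p) (h : c < bound) :
    pfbIters p bound c = pfbIters p bound (c+p) + 1 := by
  have hneg : PySem.Int.floordiv (c - bound) p < 0 := by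
    rw [PySem.Int.floordiv_lt_iff_lt_mul (by omega : (0:Int) < p)]
    rw [zero_mul]; omega
  unfold pfbIters
  rw [PySem.Int.floordiv_eq_ediv_of_pos (by omega : (0:Int) < p)] at hneg ⊢
  rw [show PySem.Int.floordiv (c + p - bound) p = (c + p - bound) / p from
    PySem.Int.floordiv_eq_ediv_of_pos (by omega)]
  have hstep : (c + p - bound) / p = (c - bound) / p + 1 := by
    have h := Int.add_mul_ediv_right (c - bound) 1 (show p ≠ 0 by omega)
    rw [show c + p - bound = c - bound + 1 * p by ring, h]
  omega

-- A's inner for-loop appends exactly the clipped range [c, min(c+w, length))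
theorem pfbInner_nat (length : Int) (m : Nat) : ∀ (c : Int) (acc : List Int),
    (PySem.List.pyRange 0 (m : Int) 1).foldl
      (fun a i => if c + i < length then a ++ [c + i] else a) acc
    = acc ++ PySem.List.pyRange c (min (c + (m : Int)) length) 1 := by
  induction m with
  | zero =>
      intro c acc
      simp only [Nat.cast_zero]
      rw [PySem.List.pyRange_one_eq_nil (le_refl (0:Int)),
          PySem.List.pyRange_one_eq_nil (by omega : min (c + (0:Int)) length ≤ c)]
      simp
  | succ m ih =>
      intro c acc
      have hcast : ((m+1 : Nat) : Int) = (m : Int) + 1 := by push_cast; ring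
      rw [hcast, PySem.List.pyRange_one_succ_right (by positivity : (0:Int) ≤ (m : Int)),
          List.foldl_append, ih]
      simp only [List.foldl]
      by_cases h : c + (m : Int) < length
      · rw [if_pos h]
        have h1 : min (c + (m : Int)) length = c + (m : Int) := by omega
        have h2 : min (c + ((m : Int) + 1)) length = c + (m : Int) + 1 := by omega
        rw [h1, h2, PySem.List.pyRange_one_succ_right (by omega : c ≤ c + (m : Int))]
        simp
      · rw [if_neg h]
        have h2 : min (c + ((m : Int) + 1)) length = min (c + (m : Int)) length := by omega
        rw [h2]

theorem pfbInner_int (length w : Int) (hw : 0 ≤ w) (c : Int) (acc : List Int) :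
    (PySem.List.pyRange 0 w 1).foldl
      (fun a i => if c + i < length then a ++ [c + i] else a) acc
    = acc ++ PySem.List.pyRange c (min (c + w) length) 1 := by
  lift w to ℕ using hw
  exact pfbInner_nat length w c acc

theorem pfbLoopA_stop (line base_len length : Int) (fuel : Nat) (c : Int) (acc : List Int)
    (h : length + base_len ≤ c) : pfbLoopA line base_len length fuel c acc = acc := by
  cases fuel with
  | zero => rfl
  | succ fuel => unfold pfbLoopA; rw [if_neg (by omega)]

theorem pfbLoopA_wnonpos (line base_len length : Int) (hw : line + 1 ≤ 0) :
    ∀ (fuel : Nat) (c : Int) (acc : List Int), pfbLoopA line base_len length fuel c acc = acc := by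
  intro fuel
  induction fuel with
  | zero => intro c acc; rfl
  | succ fuel ih =>
      intro c acc
      unfold pfbLoopA
      rw [PySem.List.pyRange_one_eq_nil hw]
      simp only [List.foldl_nil]
      split
      · exact ih _ _
      · rfl

theorem pfbLoopA_main (line base_len length : Int) (hw : 1 ≤ line + 1) (hbl : 1 ≤ base_len) :
    ∀ (fuel : Nat) (c : Int) (acc : List Int), (length + base_len - c).toNat ≤ fuel →
    pfbLoopA line base_len length fuel c acc
      = acc ++ pfbClumps (line+1) ((line+1)*base_len) length
          (pfbIters ((line+1)*base_len) (length + base_len) c) c := by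
  have hp : 1 ≤ (line+1)*base_len := by
    have := mul_pos (show (0:Int) < line + 1 by omega) (show (0:Int) < base_len by omega)
    omega
  intro fuel
  induction fuel with
  | zero =>
      intro c acc h
      rw [pfbIters_zero hp (by omega)]
      simp [pfbLoopA, pfbClumps]
  | succ fuel ih =>
      intro c acc h
      by_cases hc : c < length + base_len
      · unfold pfbLoopA
        rw [if_pos hc, pfbInner_int length (line+1) (by omega) c acc,
            ih (c + (line+1)*base_len) _ (by omega),
            pfbIters_succ hp hc]
        simp [pfbClumps]
      · rw [pfbIters_zero hp (by omega), pfbLoopA_stop _ _ _ _ _ _ (by omega)]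
        simp [pfbClumps]

-- empty clumps once the start has passed length
theorem pfbClumps_nil (w p length : Int) (hp : 0 ≤ p) :
    ∀ (n : Nat) (c : Int), length ≤ c → pfbClumps w p length n c = [] := by
  intro n
  induction n with
  | zero => intro c _; rfl
  | succ n ih =>
      intro c hc
      unfold pfbClumps
      rw [PySem.List.pyRange_one_eq_nil (by omega : min (c+w) length ≤ c), ih (c+p) (by omega)]
      rfl

-- every clump element lies at or above the current clump start
theorem pfbClumps_lb (w p length : Int) (hp : 0 ≤ p) :
    ∀ (n : Nat) (c : Int) (x : Int), x ∈ pfbClumps w p length n c → c ≤ x := by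
  intro n
  induction n with
  | zero => intro c x hx; cases hx
  | succ n ih =>
      intro c x hx
      unfold pfbClumps at hx
      rcases List.mem_append.mp hx with h | h
      · exact (PySem.List.mem_pyRange_one.mp h).1
      · have := ih (c+p) x h
        omega

-- the clump list is strictly increasing
theorem pfbClumps_pairwise (w p length : Int) (hwp : w ≤ p) (hp : 0 ≤ p) :
    ∀ (n : Nat) (c : Int), (pfbClumps w p length n c).Pairwise (· < ·) := by
  intro n
  induction n with
  | zero => intro c; exact List.Pairwise.nil
  | succ n ih =>
      intro c
      unfold pfbClumps
      rw [List.pairwise_append]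
      refine ⟨PySem.List.pairwise_lt_pyRange_one c (min (c+w) length), ih (c+p), ?_⟩
      intro x hx y hy
      have hx' := (PySem.List.mem_pyRange_one.mp hx).2
      have hy' := pfbClumps_lb w p length hp n (c+p) y hy
      omega

-- a strided range with positive step peels its head
theorem pfbRange_pos_cons (a b p : Int) (hp : 0 < p) (h : a < b) :
    PySem.List.pyRange a b p = a :: PySem.List.pyRange (a+p) b p := by
  rw [PySem.List.pyRange_of_pos a b hp, PySem.List.pyRange_of_pos (a+p) b hp]
  have hn : ((b - a + p - 1) / p).toNat
      = (if a + p < b then ((b - (a+p) + p - 1) / p).toNat else 0) + 1 := by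
    by_cases hab : a + p < b
    · rw [if_pos hab]
      have hstep : (b - a + p - 1) / p = (b - (a+p) + p - 1) / p + 1 := by
        have h := Int.add_mul_ediv_right (b - (a+p) + p - 1) 1 (show p ≠ 0 by omega)
        rw [show b - a + p - 1 = b - (a+p) + p - 1 + 1 * p by ring, h]
      have hq : 0 ≤ (b - (a+p) + p - 1) / p := Int.ediv_nonneg (by omega) (by omega)
      omega
    · rw [if_neg hab]
      have hq : (b - a + p - 1) / p = 1 := by
        rw [← PySem.Int.floordiv_eq_ediv_of_pos (show (0:Int) < p by omega),
            PySem.Int.floordiv_eq_iff_of_pos (by omega)]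
        constructor
        · omega
        · omega
      omega
  rw [if_pos h, hn, List.range_succ_eq_map, List.map_cons, List.map_map]
  congr 1
  · omega
  · apply List.map_congr_left
    intro k _
    simp only [Function.comp_apply]
    push_cast
    ring

-- a strided positive-step range above its stop is empty
theorem pfbRange_pos_nil (a b p : Int) (hp : 0 < p) (h : b ≤ a) :
    PySem.List.pyRange a b p = [] := by
  rw [PySem.List.pyRange_of_pos a b hp, if_neg (by omega)]
  rfl

-- flatMap of per-element cons is a permutation of heads ++ flatMap of tails
theorem pfbFlatMap_cons_perm (a : Int → Int) (t : Int → List Int) :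
    ∀ (l : List Int), (l.flatMap (fun j => a j :: t j)).Perm (l.map a ++ l.flatMap t) := by
  intro l
  induction l with
  | nil => simp
  | cons j l ih =>
      simp only [List.flatMap_cons, List.map_cons, List.cons_append]
      refine List.Perm.cons (a j) ?_
      refine ((List.Perm.append_left (t j) ih).trans List.perm_append_comm).trans ?_
      rw [List.append_assoc]
      exact List.Perm.append_left _ List.perm_append_comm

-- shifting a zero-based unit range
theorem pfbMap_add_pyRange (c t : Int) :
    (PySem.List.pyRange 0 t 1).map (fun j => c + j) = PySem.List.pyRange c (c + t) 1 := by
  rw [PySem.List.pyRange_one 0 t, PySem.List.pyRange_one c (c+t), List.map_map]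
  rw [show c + t - c = t - 0 by ring]
  apply List.map_congr_left
  intro k _
  simp only [Function.comp_apply]
  omega

-- B's column-major strided ranges are a permutation of A's row-major clump list
theorem pfbCols_perm (w p length bl : Int) (hw : 1 ≤ w) (hwp : w ≤ p) (hbl : 1 ≤ bl) :
    ∀ (n : Nat) (c : Int), pfbIters p (length + bl) c = n →
    ((PySem.List.pyRange 0 w 1).flatMap (fun j => PySem.List.pyRange (c + j) length p)).Perm
      (pfbClumps w p length n c) := by
  have hp : 1 ≤ p := by omega
  intro n
  induction n with
  | zero =>
      intro c hn
      have hc : length + bl ≤ c := by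
        by_contra hlt
        rw [pfbIters_succ hp (by omega)] at hn
        omega
      rw [List.flatMap_eq_nil_iff.mpr (by
        intro j hj
        have hj' := (PySem.List.mem_pyRange_one.mp hj).1
        exact pfbRange_pos_nil _ _ _ (by omega) (by omega))]
      exact List.Perm.refl _
  | succ n ih =>
      intro c hn
      have hc : c < length + bl := by
        by_contra hge
        rw [pfbIters_zero hp (by omega)] at hn
        omega
      by_cases hcl : length ≤ c
      · -- everything empty
        rw [List.flatMap_eq_nil_iff.mpr (by
          intro j hj
          have hj' := (PySem.List.mem_pyRange_one.mp hj).1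
          exact pfbRange_pos_nil _ _ _ (by omega) (by omega)),
          pfbClumps_nil w p length (by omega) (n+1) c hcl]
      · have hcl' : c < length := by omega
        set t := min w (length - c) with ht
        have ht1 : 1 ≤ t := by omega
        have htw : t ≤ w := by omega
        rw [PySem.List.pyRange_one_append 0 t w (by omega) htw, List.flatMap_append]
        have hsecond : ((PySem.List.pyRange t w 1).flatMap
            (fun j => PySem.List.pyRange (c + j) length p)) = [] := by
          apply List.flatMap_eq_nil_iff.mpr
          intro j hj
          have hj' := PySem.List.mem_pyRange_one.mp hj
          exact pfbRange_pos_nil _ _ _ (by omega) (by omega)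
        rw [hsecond, List.append_nil]
        have hfirst : ((PySem.List.pyRange 0 t 1).flatMap
            (fun j => PySem.List.pyRange (c + j) length p))
            = (PySem.List.pyRange 0 t 1).flatMap
                (fun j => (c + j) :: PySem.List.pyRange (c + p + j) length p) := by
          apply List.flatMap_congr
          intro j hj
          have hj' := PySem.List.mem_pyRange_one.mp hj
          rw [pfbRange_pos_cons (c+j) length p (by omega) (by omega),
              show c + j + p = c + p + j by ring]
        rw [hfirst]
        have htails : ((PySem.List.pyRange 0 t 1).flatMap
            (fun j => PySem.List.pyRange (c + p + j) length p))
            = ((PySem.List.pyRange 0 w 1).flatMap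
                (fun j => PySem.List.pyRange (c + p + j) length p)) := by
          rw [PySem.List.pyRange_one_append 0 t w (by omega) htw, List.flatMap_append]
          have hnil : ((PySem.List.pyRange t w 1).flatMap
              (fun j => PySem.List.pyRange (c + p + j) length p)) = [] := by
            apply List.flatMap_eq_nil_iff.mpr
            intro j hj
            have hj' := PySem.List.mem_pyRange_one.mp hj
            exact pfbRange_pos_nil _ _ _ (by omega) (by omega)
          rw [hnil, List.append_nil]
        refine (pfbFlatMap_cons_perm (fun j => c + j)
          (fun j => PySem.List.pyRange (c + p + j) length p) _).trans ?_
        rw [htails, pfbMap_add_pyRange c t,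
            show c + t = min (c + w) length from by omega]
        unfold pfbClumps
        exact List.Perm.append_left _
          (ih (c+p) (by rw [pfbIters_succ hp hc] at hn; omega))

-- ===== VERDICT (by name: the statement is the Claim_ definition above) =====
theorem positions_for_base_spec : Claim_equal_positions_for_base := by
  intro base_pos line base_len length hdom hpre
  show positions_for_base base_pos line base_len length
      = positions_for_base_alt base_pos line base_len length
  simp only [positions_for_base, positions_for_base_alt]
  by_cases hw : 1 ≤ line + 1
  · by_cases hbl : 1 ≤ base_len
    · -- main case: A's loop unrolls to clipped clumps, the strictly increasing
      -- rearrangement of B's sorted column ranges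
      have hp : 1 ≤ (line+1)*base_len := by
        have := mul_pos (show (0:Int) < line + 1 by omega) (show (0:Int) < base_len by omega)
        omega
      rw [if_neg (by omega : ¬ (line + 1 ≤ 0 ∨ base_len ≤ 0))]
      rw [pfbLoopA_main line base_len length hw hbl _ _ _ (by omega)]
      by_cases hfl : length ≤ (line+1) * base_pos - 1
      · rw [if_pos hfl,
            pfbClumps_nil (line+1) ((line+1)*base_len) length (by omega) _ _ hfl]
        simp [PySem.List.slice_from_one]
      · rw [if_neg hfl,
            PySem.List.sorted_eq_of_perm_of_pairwise_lt _ _ _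
              (pfbCols_perm (line+1) ((line+1)*base_len) length base_len hw
                (by nlinarith) hbl _ _ rfl).symm
              (pfbClumps_pairwise (line+1) ((line+1)*base_len) length
                (by nlinarith) (by omega) _ _)]
        simp
    · -- base_len ≤ 0: step non-positive, Pre_ forces the loop never entered; both are []
      have hfirst : length + base_len ≤ (line+1) * base_pos - 1 := by
        rcases hpre with h | h
        · exfalso
          have h0 : (0:Int) ≤ line + 1 := by omega
          have h1 : base_len ≤ 0 := by omega
          nlinarith
        · exact h
      rw [if_pos (Or.inr (by omega)), pfbLoopA_stop _ _ _ _ _ _ hfirst]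
      simp [PySem.List.slice_from_one]
  · -- line + 1 ≤ 0: the inner for-loop is empty, A appends nothing; both are []
    rw [if_pos (Or.inl (by omega)), pfbLoopA_wnonpos line base_len length (by omega)]
    simp [PySem.List.slice_from_one]
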